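-- pv_equiv track=rewrite | github.com/patt812/competition | python/AtCoder/ABC/249/249a.py | solve
-- ===== SOURCE A (Python) =====
-- def solve(a, b, c, x):
--   w = 0
--   y = 0
--   z = True
--   for i in range(x):
--     if z:
--       if y < a:
--         w += b
--         y += 1
--       else:
--         y = 1
--         z = False
--     else:
--       if y < c:
--         y += 1
--       else:
--         y = 1
--         w += b
--         z = True
--   return w
-- ===== SOURCE B (Python) =====
-- def solve(a, b, c, x):
--     if x <= 0:
--         return 0
--     p = a + c
--     return b * ((x // p) * a + min(x % p, a))
-- ===== Notes on version B (the rewrite author's own statement) =====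
-- stated objective: faster
-- what changed: Replaces the minute-by-minute walk/rest state-machine simulation with a closed form: b times (full cycles of length a+c contribute a walking minutes each, plus min(remainder, a) in the partial cycle).
-- outside the precondition, e.g. on solve(0, 5, 2, 4): A returns 5, B returns 0; on solve(1, 5, -1, 3): A returns 10, B raises ZeroDivisionError
import Mathlib
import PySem

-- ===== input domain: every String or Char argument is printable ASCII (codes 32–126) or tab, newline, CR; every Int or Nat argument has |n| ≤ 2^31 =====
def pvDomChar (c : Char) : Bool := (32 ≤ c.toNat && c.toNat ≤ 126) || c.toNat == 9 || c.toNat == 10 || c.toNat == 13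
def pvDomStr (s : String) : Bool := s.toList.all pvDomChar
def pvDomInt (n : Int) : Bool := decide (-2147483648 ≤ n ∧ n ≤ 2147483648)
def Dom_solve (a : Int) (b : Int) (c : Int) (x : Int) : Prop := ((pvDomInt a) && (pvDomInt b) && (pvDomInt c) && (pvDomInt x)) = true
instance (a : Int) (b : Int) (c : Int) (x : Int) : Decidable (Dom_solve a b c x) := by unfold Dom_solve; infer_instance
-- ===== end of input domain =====

-- B replaces the O(x) minute-by-minute walk/rest simulation with an O(1) closed form
-- (full cycles of length a+c contribute a walking minutes each, plus min(remainder, a)).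

-- ===== PORT A =====
-- one iteration of A's for-loop body on the state (w, y, z)
def solveStep (a b c : Int) (st : Int × Int × Bool) : Int × Int × Bool :=
  match st with
  | (w, y, z) =>
    if z then
      if y < a then (w + b, y + 1, z) else (w, 1, false)
    else
      if y < c then (w, y + 1, z) else (w + b, 1, true)

def solve (a : Int) (b : Int) (c : Int) (x : Int) : Int :=
  ((PySem.List.pyRange 0 x 1).foldl (fun st _ => solveStep a b c st) (0, 0, true)).1

-- ===== PORT B =====
def solve_alt (a : Int) (b : Int) (c : Int) (x : Int) : Int :=
  if x ≤ 0 then 0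
  else
    let p := a + c
    b * (PySem.Int.floordiv x p * a + min (PySem.Int.mod x p) a)

-- ===== PRECONDITION & SPEC =====
-- Pre_ restricts to the problem's natural domain (ABC249A guarantees a, c ≥ 1: positive walk
-- and rest durations) plus the trivial x ≤ 0 inputs (no minutes simulated, both return 0);
-- for x > 0 with a ≤ 0 or c ≤ 0 B's cycle arithmetic does not model A's state machine
-- (and B raises ZeroDivisionError when a + c = 0).
def Pre_solve (a : Int) (b : Int) (c : Int) (x : Int) : Prop := (1 ≤ a ∧ 1 ≤ c) ∨ x ≤ 0
instance (a : Int) (b : Int) (c : Int) (x : Int) : Decidable (Pre_solve a b c x) := by unfold Pre_solve; infer_instance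
def pvWitness_solve : Int × Int × Int × Int := (2, 5, 3, 11)

def Spec_solve (a : Int) (b : Int) (c : Int) (x : Int) (out : Int) : Prop := out = solve_alt a b c x
instance (a : Int) (b : Int) (c : Int) (x : Int) (out : Int) : Decidable (Spec_solve a b c x out) := by unfold Spec_solve; infer_instance

-- ===== CLAIM (what is proved, stated in full; the proofs are below) =====
def Claim_equal_solve : Prop := ∀ (a : Int) (b : Int) (c : Int) (x : Int), Dom_solve a b c x → Pre_solve a b c x → Spec_solve a b c x (solve a b c x)

-- ===== LEMMAS AND PROOFS =====

theorem foldl_const_iterate {α β : Type} (g : β → β) (l : List α) (st : β) :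
    l.foldl (fun s _ => g s) st = g^[l.length] st := by
  induction l generalizing st with
  | nil => rfl
  | cons h t ih => simp [List.foldl, Function.iterate_succ_apply, ih]

-- walking phase: j minutes with z = true, y staying ≤ a, each adds b
theorem walk_iter (a b c : Int) (j : Nat) :
    ∀ (w y : Int), 1 ≤ y → y + j ≤ a →
      (solveStep a b c)^[j] (w, y, true) = (w + b * j, y + j, true) := by
  induction j with
  | zero => intro w y _ _; simp
  | succ j ih =>
    intro w y hy hle
    have hylt : y < a := by omega
    rw [Function.iterate_succ_apply]
    have hstep : solveStep a b c (w, y, true) = (w + b, y + 1, true) := by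
      simp [solveStep, hylt]
    rw [hstep, ih (w + b) (y + 1) (by omega) (by omega)]
    simp only [Prod.mk.injEq]
    and_intros <;> first | trivial | omega | (push_cast; ring)

-- resting phase: j minutes with z = false, y staying ≤ c, adding nothing
theorem rest_iter (a b c : Int) (j : Nat) :
    ∀ (w y : Int), 1 ≤ y → y + j ≤ c →
      (solveStep a b c)^[j] (w, y, false) = (w, y + j, false) := by
  induction j with
  | zero => intro w y _ _; simp
  | succ j ih =>
    intro w y hy hle
    have hylt : y < c := by omega
    rw [Function.iterate_succ_apply]
    have hstep : solveStep a b c (w, y, false) = (w, y + 1, false) := by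
      simp [solveStep, hylt]
    rw [hstep, ih w (y + 1) (by omega) (by omega)]
    simp only [Prod.mk.injEq]
    and_intros <;> first | trivial | omega | (push_cast; ring)

-- one full cycle of length A + C from the steady state (w, C, false)
theorem cycle_iter (b : Int) (A C : Nat) (hA : 1 ≤ A) (hC : 1 ≤ C) (w : Int) :
    (solveStep (A : Int) b (C : Int))^[A + C] (w, (C : Int), false)
      = (w + b * A, (C : Int), false) := by
  have hA1 : ((A - 1 : Nat) : Int) = (A : Int) - 1 := by omega
  have hsplit : A + C = (C - 1) + (1 + ((A - 1) + 1)) := by omega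
  rw [hsplit, Function.iterate_add_apply, Function.iterate_add_apply,
      Function.iterate_add_apply, Function.iterate_one]
  have e1 : solveStep (A : Int) b (C : Int) (w, (C : Int), false) = (w + b, 1, true) := by
    simp [solveStep]
  rw [e1, walk_iter _ _ _ (A - 1) (w + b) 1 le_rfl (by omega), hA1]
  have e2 : solveStep (A : Int) b (C : Int) (w + b + b * ((A : Int) - 1), 1 + ((A : Int) - 1), true)
      = (w + b * A, 1, false) := by
    have hn : ¬ ((1 : Int) + ((A : Int) - 1) < (A : Int)) := by omega
    simp only [solveStep, if_neg hn, if_true, Prod.mk.injEq]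
    and_intros <;> first | trivial | omega | (push_cast; ring)
  rw [e2, rest_iter _ _ _ (C - 1) (w + b * A) 1 le_rfl (by omega)]
  simp only [Prod.mk.injEq]
  and_intros <;> first | trivial | omega | (push_cast; ring)

-- k full cycles
theorem cycles_iter (b : Int) (A C : Nat) (hA : 1 ≤ A) (hC : 1 ≤ C) (k : Nat) :
    ∀ (w : Int), (solveStep (A : Int) b (C : Int))^[k * (A + C)] (w, (C : Int), false)
      = (w + b * A * k, (C : Int), false) := by
  induction k with
  | zero => intro w; simp
  | succ k ih =>
    intro w
    have hsum : (k + 1) * (A + C) = (A + C) + k * (A + C) := by ring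
    rw [hsum, Function.iterate_add_apply, ih, cycle_iter b A C hA hC]
    simp only [Prod.mk.injEq]
    and_intros <;> first | trivial | omega | (push_cast; ring)

-- the partial last cycle: q < A + C steps from the steady state add b * min q A
theorem partial_iter (b : Int) (A C : Nat) (hA : 1 ≤ A) (hC : 1 ≤ C) (q : Nat)
    (hq : q < A + C) (w : Int) :
    ((solveStep (A : Int) b (C : Int))^[q] (w, (C : Int), false)).1
      = w + b * min (q : Int) (A : Int) := by
  have e1 : solveStep (A : Int) b (C : Int) (w, (C : Int), false) = (w + b, 1, true) := by
    simp [solveStep]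
  by_cases h0 : q = 0
  · subst h0; simp
  · by_cases hle : q ≤ A
    · have hmin : min (q : Int) (A : Int) = (q : Int) := by
        apply min_eq_left; exact_mod_cast hle
      conv_lhs => rw [show q = (q - 1) + 1 from by omega, Function.iterate_add_apply,
        Function.iterate_one]
      rw [e1, walk_iter _ _ _ (q - 1) (w + b) 1 le_rfl (by omega), hmin]
      have hq1 : ((q - 1 : Nat) : Int) = (q : Int) - 1 := by omega
      simp only [hq1]
      ring
    · have hmin : min (q : Int) (A : Int) = (A : Int) := by
        apply min_eq_right; exact_mod_cast (by omega : A ≤ q)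
      have hA1 : ((A - 1 : Nat) : Int) = (A : Int) - 1 := by omega
      conv_lhs => rw [show q = (q - A - 1) + (1 + ((A - 1) + 1)) from by omega,
        Function.iterate_add_apply, Function.iterate_add_apply,
        Function.iterate_add_apply, Function.iterate_one]
      rw [e1, walk_iter _ _ _ (A - 1) (w + b) 1 le_rfl (by omega), hA1]
      have e2 : solveStep (A : Int) b (C : Int) (w + b + b * ((A : Int) - 1), 1 + ((A : Int) - 1), true)
          = (w + b * A, 1, false) := by
        have hn : ¬ ((1 : Int) + ((A : Int) - 1) < (A : Int)) := by omega
        simp only [solveStep, if_neg hn, if_true, Prod.mk.injEq]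
        and_intros <;> first | trivial | omega | (push_cast; ring)
      rw [e2, rest_iter _ _ _ (q - A - 1) (w + b * A) 1 le_rfl (by omega), hmin]

-- ===== VERDICT (by name: the statement is the Claim_ definition above) =====
theorem solve_spec : Claim_equal_solve := by
  intro a b c x _ hpre
  unfold Spec_solve solve solve_alt
  rw [foldl_const_iterate, PySem.List.length_pyRange_one]
  by_cases hx : x ≤ 0
  · have h0 : (x - 0).toNat = 0 := by omega
    have h0' : x.toNat = 0 := by omega
    simp [h0, h0', hx]
  · obtain ⟨ha, hc⟩ : 1 ≤ a ∧ 1 ≤ c := by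
      rcases hpre with h | h
      · exact h
      · omega
    obtain ⟨A, hAeq⟩ : ∃ A : Nat, a = (A : Int) := ⟨a.toNat, (Int.toNat_of_nonneg (by omega)).symm⟩
    obtain ⟨C, hCeq⟩ : ∃ C : Nat, c = (C : Int) := ⟨c.toNat, (Int.toNat_of_nonneg (by omega)).symm⟩
    subst hAeq hCeq
    have hA : 1 ≤ A := by exact_mod_cast ha
    have hC : 1 ≤ C := by exact_mod_cast hc
    obtain ⟨n, hn, hneq⟩ : ∃ n : Nat, 1 ≤ n ∧ x = (n : Int) :=
      ⟨x.toNat, by omega, (Int.toNat_of_nonneg (by omega)).symm⟩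
    subst hneq
    have hxt : ((n : Int) - 0).toNat = n := by omega
    rw [hxt]
    -- after one step, the start state (0,0,true) coincides with one step
    -- from the virtual steady state (0,C,false): both give (b,1,true)
    have hfirst : (solveStep (A : Int) b (C : Int))^[n] ((0 : Int), (0 : Int), true)
        = (solveStep (A : Int) b (C : Int))^[n] ((0 : Int), (C : Int), false) := by
      obtain ⟨m, hm⟩ : ∃ m, n = m + 1 := ⟨n - 1, by omega⟩
      subst hm
      rw [Function.iterate_succ_apply, Function.iterate_succ_apply]
      have e1 : solveStep (A : Int) b (C : Int) ((0 : Int), (0 : Int), true) = (b, 1, true) := by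
        have h : (0 : Int) < (A : Int) := by omega
        have h' : A ≠ 0 := by omega
        simp [solveStep, h, h']
      have e2 : solveStep (A : Int) b (C : Int) ((0 : Int), (C : Int), false) = (b, 1, true) := by
        simp [solveStep]
      rw [e1, e2]
    have hP : 0 < A + C := by omega
    have hdecomp : n = n % (A + C) + n / (A + C) * (A + C) := by
      rw [Nat.mod_add_div']
    have hL : ((solveStep (A : Int) b (C : Int))^[n] ((0 : Int), (C : Int), false)).1
        = b * (A : Int) * ((n / (A + C) : Nat) : Int)
          + b * min ((n % (A + C) : Nat) : Int) (A : Int) := by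
      conv_lhs => rw [hdecomp, Function.iterate_add_apply]
      rw [cycles_iter b A C hA hC _ 0, partial_iter b A C hA hC _ (Nat.mod_lt n hP) _]
      ring
    have hxle : ¬ ((n : Int) ≤ 0) := by omega
    rw [hfirst, hL, if_neg hxle]
    have hpc : ((A : Int) + (C : Int)) = ((A + C : Nat) : Int) := by push_cast; ring
    simp only [hpc, PySem.Int.floordiv_natCast, PySem.Int.mod_natCast]
    ring
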